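-- pv_equiv track=rewrite | github.com/atul-ramkrishnan/AdventOfCode2024 | day2/sol2.py | checkLevel
-- ===== SOURCE A (Python) =====
-- def checkLevel(levels):
--     if len(levels) == 0 or len(levels) == 1:
--         return 1
--     asc = True if levels[0] < levels[1] else False
--     for i in range(len(levels)-1):
--         if asc and levels[i] > levels[i+1]:
--             return 0
--         if not asc and levels[i] < levels[i+1]:
--             return 0
--         if abs(levels[i+1] - levels[i]) == 0 or abs(levels[i+1] - levels[i]) > 3:
--             return 0
--     return 1
-- ===== SOURCE B (Python) =====
-- def checkLevel(levels):
--     if len(levels) <= 1: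
--         return 1
--     diffs = [levels[i + 1] - levels[i] for i in range(len(levels) - 1)]
--     ok = all(1 <= d <= 3 for d in diffs) or all(-3 <= d <= -1 for d in diffs)
--     return 1 if ok else 0
-- ===== Notes on version B (the rewrite author's own statement) =====
-- stated objective: simpler
-- what changed: Replaces the first-pair direction flag and stateful early-return index loop by building the adjacent-difference list once and judging it with two uniform range checks (all diffs in [1,3] or all in [-3,-1]).
import Mathlib
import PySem

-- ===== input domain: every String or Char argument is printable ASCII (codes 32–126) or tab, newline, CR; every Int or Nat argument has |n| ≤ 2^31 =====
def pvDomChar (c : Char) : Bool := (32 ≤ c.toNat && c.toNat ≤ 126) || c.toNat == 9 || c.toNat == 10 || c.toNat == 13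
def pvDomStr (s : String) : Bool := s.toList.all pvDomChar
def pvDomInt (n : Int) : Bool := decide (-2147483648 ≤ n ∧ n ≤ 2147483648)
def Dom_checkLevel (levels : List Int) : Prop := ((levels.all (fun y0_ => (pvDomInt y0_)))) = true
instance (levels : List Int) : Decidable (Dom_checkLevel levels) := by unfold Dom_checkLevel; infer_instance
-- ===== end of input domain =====

-- B replaces A's direction flag and stateful early-return index loop by an adjacent-difference
-- list judged with two uniform range checks (objective: simpler; same O(n) cost).


-- ===== PORT A =====
-- the for-loop with early returns, as structural recursion over the index list
def checkLevelLoop (levels : List Int) (asc : Bool) : List Int → Int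
  | [] => 1
  | i :: rest =>
    let a := PySem.List.pyGetD levels i 0
    let b := PySem.List.pyGetD levels (i + 1) 0
    if asc && decide (a > b) then 0
    else if !asc && decide (a < b) then 0
    else if decide ((b - a).natAbs = 0) || decide ((b - a).natAbs > 3) then 0
    else checkLevelLoop levels asc rest

def checkLevel (levels : List Int) : Int :=
  if levels.length = 0 ∨ levels.length = 1 then 1
  else
    let asc : Bool := decide (PySem.List.pyGetD levels 0 0 < PySem.List.pyGetD levels 1 0)
    checkLevelLoop levels asc (PySem.List.pyRange 0 ((levels.length : Int) - 1) 1)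

-- ===== PORT B =====
def checkLevel_alt (levels : List Int) : Int :=
  if levels.length ≤ 1 then 1
  else
    let diffs := (PySem.List.pyRange 0 ((levels.length : Int) - 1) 1).map
      (fun i => PySem.List.pyGetD levels (i + 1) 0 - PySem.List.pyGetD levels i 0)
    if diffs.all (fun d => decide (1 ≤ d ∧ d ≤ 3)) ||
       diffs.all (fun d => decide (-3 ≤ d ∧ d ≤ -1)) then 1 else 0

-- ===== PRECONDITION & SPEC =====
def Spec_checkLevel (levels : List Int) (out : Int) : Prop := out = checkLevel_alt levels
instance (levels : List Int) (out : Int) : Decidable (Spec_checkLevel levels out) := by unfold Spec_checkLevel; infer_instance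

-- ===== CLAIM (what is proved, stated in full; the proofs are below) =====
def Claim_equal_checkLevel : Prop := ∀ (levels : List Int), Dom_checkLevel levels → Spec_checkLevel levels (checkLevel levels)

-- ===== LEMMAS AND PROOFS =====

-- the per-step success condition of A's loop body
def stepOK (levels : List Int) (asc : Bool) (i : Int) : Bool :=
  let a := PySem.List.pyGetD levels i 0
  let b := PySem.List.pyGetD levels (i + 1) 0
  !(asc && decide (a > b)) && !(!asc && decide (a < b)) &&
    !(decide ((b - a).natAbs = 0) || decide ((b - a).natAbs > 3))

theorem checkLevelLoop_eq (levels : List Int) (asc : Bool) (r : List Int) :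
    checkLevelLoop levels asc r = if r.all (stepOK levels asc) then 1 else 0 := by
  induction r with
  | nil => simp [checkLevelLoop]
  | cons i rest ih =>
    simp only [checkLevelLoop, stepOK, List.all_cons, Bool.and_eq_true, Bool.not_eq_true',
      Bool.and_eq_false_iff, Bool.or_eq_true, Bool.or_eq_false_iff, decide_eq_true_eq,
      decide_eq_false_iff_not]
    rw [ih]
    split_ifs <;> first | rfl | (exfalso; simp_all <;> omega) | (exfalso; cases asc <;> simp_all <;> omega)

theorem stepOK_true (levels : List Int) (i : Int) :
    stepOK levels true i =
      decide (1 ≤ PySem.List.pyGetD levels (i+1) 0 - PySem.List.pyGetD levels i 0 ∧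
              PySem.List.pyGetD levels (i+1) 0 - PySem.List.pyGetD levels i 0 ≤ 3) := by
  simp only [stepOK, Bool.not_true, Bool.true_and, Bool.false_and, Bool.not_false, Bool.and_true,
    ← decide_not, ← Bool.decide_or, ← Bool.decide_and, decide_eq_decide]
  omega

theorem stepOK_false (levels : List Int) (i : Int) :
    stepOK levels false i =
      decide (-3 ≤ PySem.List.pyGetD levels (i+1) 0 - PySem.List.pyGetD levels i 0 ∧
              PySem.List.pyGetD levels (i+1) 0 - PySem.List.pyGetD levels i 0 ≤ -1) := by
  simp only [stepOK, Bool.false_and, Bool.not_false, Bool.true_and, Bool.and_true,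
    ← decide_not, ← Bool.decide_or, ← Bool.decide_and, decide_eq_decide]
  omega

theorem checkLevel_spec : Claim_equal_checkLevel := by
  intro levels _
  unfold Spec_checkLevel checkLevel checkLevel_alt
  by_cases h : levels.length = 0 ∨ levels.length = 1
  · have h' : levels.length ≤ 1 := by omega
    rw [if_pos h, if_pos h']
  · have h2 : 2 ≤ levels.length := by omega
    rw [if_neg h, if_neg (by omega : ¬ levels.length ≤ 1)]
    rw [checkLevelLoop_eq]
    set r := PySem.List.pyRange 0 ((levels.length : Int) - 1) 1 with hr
    have h0r : (0 : Int) ∈ r := by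
      rw [hr, PySem.List.mem_pyRange_one]
      constructor
      · omega
      · push_cast; omega
    simp only [List.all_map]
    have hcomp : ((fun d => decide (1 ≤ d ∧ d ≤ 3)) ∘
        fun i => PySem.List.pyGetD levels (i + 1) 0 - PySem.List.pyGetD levels i 0)
        = stepOK levels true := by
      funext i; simp only [Function.comp]; rw [stepOK_true]
    have hcomp2 : ((fun d => decide (-3 ≤ d ∧ d ≤ -1)) ∘
        fun i => PySem.List.pyGetD levels (i + 1) 0 - PySem.List.pyGetD levels i 0)
        = stepOK levels false := by
      funext i; simp only [Function.comp]; rw [stepOK_false]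
    rw [hcomp, hcomp2]
    by_cases hasc : PySem.List.pyGetD levels 0 0 < PySem.List.pyGetD levels 1 0
    · rw [show decide (PySem.List.pyGetD levels 0 0 < PySem.List.pyGetD levels 1 0) = true from by simpa using hasc]
      have hall2 : r.all (stepOK levels false) = false := by
        rw [List.all_eq_false]
        refine ⟨0, h0r, ?_⟩
        rw [stepOK_false]
        simp only [zero_add, decide_eq_true_eq]
        omega
      rw [hall2, Bool.or_false]
    · rw [show decide (PySem.List.pyGetD levels 0 0 < PySem.List.pyGetD levels 1 0) = false from by simpa using hasc]
      have hall1 : r.all (stepOK levels true) = false := by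
        rw [List.all_eq_false]
        refine ⟨0, h0r, ?_⟩
        rw [stepOK_true]
        simp only [zero_add, decide_eq_true_eq]
        omega
      rw [hall1, Bool.false_or]
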